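-- pv_equiv track=rewrite | github.com/AfoninSV/python_scripts | simmetrical_seq.py | symmetry_check
-- ===== SOURCE A (Python) =====
-- def symmetry_check(seq):
--     absence = []
--     flag = False
--     # cut last same numbers
--     counter = 0
--     while True:
--         if seq[-1] == seq[counter - 1]:
--             counter -= 1
--         else:
--             break
--
--     # check for symmetry through both list sides
--     for right_num in range(len(seq) - 1, -1 + abs(counter), -1):
--         left_num = len(seq) - 1 - right_num
--         if flag:
--             absence.insert(0, seq[left_num])
--         elif seq[left_num] != seq[right_num]:
--             flag = True
--             absence.insert(0, seq[left_num])
--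
--     return absence
-- ===== SOURCE B (Python) =====
-- def symmetry_check(seq):
--     n = len(seq)
--     last = seq[-1]
--     # length of the trailing run of elements equal to the last one
--     t = 0
--     while t < n and seq[n - 1 - t] == last:
--         t += 1
--     m = n - t
--     # first position where the sequence disagrees with its mirror image
--     for i in range(m):
--         if seq[i] != seq[n - 1 - i]:
--             return seq[i:m][::-1]
--     return []
-- ===== Notes on version B (the rewrite author's own statement) =====
-- stated objective: faster
-- what changed: The flag-state accumulator that insert(0,...)s elements one by one is replaced by finding the first mirror-mismatch index and returning one reversed slice seq[i:m][::-1]; the trailing-run trim counts upward instead of driving a negative index down.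
import Mathlib
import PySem

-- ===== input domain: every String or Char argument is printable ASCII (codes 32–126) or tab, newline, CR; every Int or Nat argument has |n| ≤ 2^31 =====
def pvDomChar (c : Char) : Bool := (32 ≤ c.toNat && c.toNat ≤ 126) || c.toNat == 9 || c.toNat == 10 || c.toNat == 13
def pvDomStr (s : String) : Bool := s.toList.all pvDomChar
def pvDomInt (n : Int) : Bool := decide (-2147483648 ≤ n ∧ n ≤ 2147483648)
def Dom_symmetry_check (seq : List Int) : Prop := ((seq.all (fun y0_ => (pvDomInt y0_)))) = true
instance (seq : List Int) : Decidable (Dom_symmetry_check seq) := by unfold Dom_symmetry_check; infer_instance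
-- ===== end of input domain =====

-- B replaces A's flag-state insert(0,..) accumulator by find-first-mismatch then one reversed slice (objective: faster — A's insert(0,..) accumulator is quadratic, the slice is linear).

-- ===== PORT A =====
-- the 'while True' trim loop: counter goes 0, -1, -2, …; fuel len+1 suffices whenever the
-- Python loop terminates without IndexError; 'none' = IndexError (excluded by Pre_)
def pvTrimA (seq : List Int) : Nat → Int → Option Int
  | 0, _ => none
  | fuel + 1, counter =>
    match PySem.List.pyGet? seq (-1), PySem.List.pyGet? seq (counter - 1) with
    | some a, some b => if a = b then pvTrimA seq fuel (counter - 1) else some counter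
    | _, _ => none

def symmetry_check (seq : List Int) : List Int :=
  match pvTrimA seq (seq.length + 1) 0 with
  | none => []  -- Python raised IndexError here (outside Pre_)
  | some counter =>
    ((PySem.List.pyRange ((seq.length : Int) - 1) (-1 + |counter|) (-1)).foldl
      (fun (st : List Int × Bool) right_num =>
        let left_num := (seq.length : Int) - 1 - right_num
        if st.2 then (PySem.List.pyGetD seq left_num 0 :: st.1, st.2)
        else if PySem.List.pyGetD seq left_num 0 ≠ PySem.List.pyGetD seq right_num 0 then
          (PySem.List.pyGetD seq left_num 0 :: st.1, true)
        else st) ([], false)).1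

-- ===== PORT B =====
-- 'while t < n and seq[n-1-t] == last: t += 1'  (indices are in range, so getD is exact)
def pvTrimB (seq : List Int) (last : Int) (n : Nat) (t : Nat) : Nat :=
  if h : t < n ∧ seq.getD (n - 1 - t) 0 = last then pvTrimB seq last n (t + 1) else t
termination_by n - t
decreasing_by omega

-- 'for i in range(m): if seq[i] != seq[n-1-i]: return seq[i:m][::-1]' then 'return []'
def pvFindB (seq : List Int) (n m : Nat) (i : Nat) : List Int :=
  if h : i < m then
    if seq.getD i 0 ≠ seq.getD (n - 1 - i) 0 then
      (PySem.List.slice seq (some (i : Int)) (some (m : Int))).reverse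
    else pvFindB seq n m (i + 1)
  else []
termination_by m - i
decreasing_by omega

def symmetry_check_alt (seq : List Int) : List Int :=
  match PySem.List.pyGet? seq (-1) with
  | none => []  -- seq[-1] raises IndexError on []
  | some last =>
    let n := seq.length
    let t := pvTrimB seq last n 0
    pvFindB seq n (n - t) 0

-- ===== PRECONDITION & SPEC =====
-- Pre_ excludes exactly the inputs on which A raises IndexError (negative-index wraparound in
-- the trim loop): the empty list and nonempty lists all of whose elements equal the last one.
def Pre_symmetry_check (seq : List Int) : Prop :=
  seq ≠ [] ∧ ∃ x ∈ seq, x ≠ seq.getLastD 0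
instance (seq : List Int) : Decidable (Pre_symmetry_check seq) := by
  unfold Pre_symmetry_check; infer_instance
def pvWitness_symmetry_check : List Int := [1, 2, 2]

def Spec_symmetry_check (seq : List Int) (out : List Int) : Prop := out = symmetry_check_alt seq
instance (seq : List Int) (out : List Int) : Decidable (Spec_symmetry_check seq out) := by unfold Spec_symmetry_check; infer_instance

-- ===== CLAIM (what is proved, stated in full; the proofs are below) =====
def Claim_equal_symmetry_check : Prop := ∀ (seq : List Int), Dom_symmetry_check seq → Pre_symmetry_check seq → Spec_symmetry_check seq (symmetry_check seq)

-- ===== LEMMAS AND PROOFS =====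

theorem pvTrimB_le (seq : List Int) (last : Int) (n i : Nat) (h : i ≤ n) :
    pvTrimB seq last n i ≤ n := by
  induction i using pvTrimB.induct seq last n with
  | case1 t hc ih => rw [pvTrimB, dif_pos hc]; exact ih (by omega)
  | case2 t hc => rw [pvTrimB, dif_neg hc]; omega

theorem pvTrimB_stop (seq : List Int) (last : Int) (n i : Nat)
    (h : pvTrimB seq last n i < n) :
    seq.getD (n - 1 - pvTrimB seq last n i) 0 ≠ last := by
  induction i using pvTrimB.induct seq last n with
  | case1 t hc ih => rw [pvTrimB, dif_pos hc] at h ⊢; exact ih h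
  | case2 t hc =>
    rw [pvTrimB, dif_neg hc] at h ⊢
    intro he; exact hc ⟨h, he⟩

theorem pvTrimB_run (seq : List Int) (last : Int) (n i : Nat) : ∀ k,
    i ≤ k → k < pvTrimB seq last n i →
    seq.getD (n - 1 - k) 0 = last := by
  induction i using pvTrimB.induct seq last n with
  | case1 t hc ih =>
    intro k h1 h2
    rw [pvTrimB, dif_pos hc] at h2
    rcases Nat.eq_or_lt_of_le h1 with rfl | hlt
    · exact hc.2
    · exact ih k hlt h2
  | case2 t hc =>
    intro k h1 h2
    rw [pvTrimB, dif_neg hc] at h2; omega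

theorem pvTrimB_lt (seq : List Int) (_h : seq ≠ [])
    (hx : ∃ x ∈ seq, x ≠ seq.getLastD 0) :
    pvTrimB seq (seq.getLastD 0) seq.length 0 < seq.length := by
  set n := seq.length with hn
  by_contra hge
  have hle := pvTrimB_le seq (seq.getLastD 0) n 0 (by omega)
  have hTn : pvTrimB seq (seq.getLastD 0) n 0 = n := by omega
  obtain ⟨x, hmem, hne⟩ := hx
  obtain ⟨j, hj, rfl⟩ := List.mem_iff_getElem.1 hmem
  apply hne
  have := pvTrimB_run seq (seq.getLastD 0) n 0 (n - 1 - j) (by omega) (by omega)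
  have hidx : n - 1 - (n - 1 - j) = j := by omega
  rw [hidx] at this
  rw [← this, List.getD_eq_getElem?_getD, List.getElem?_eq_getElem hj]
  rfl
theorem pvIdx (seq : List Int) (i : Nat) (hi : i < seq.length) :
    PySem.List.pyGet? seq (-(i : Int) - 1) = some (seq.getD (seq.length - 1 - i) 0) := by
  have harg : -(i : Int) - 1 = -((i + 1 : Nat) : Int) := by push_cast; ring
  rw [harg, PySem.List.pyGet?_neg_natCast seq (i + 1) (by omega) (by omega),
    List.getElem?_eq_getElem (by omega)]
  congr 1
  rw [List.getD_eq_getElem?_getD, List.getElem?_eq_getElem (by omega)]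
  simp
  congr 1
  omega

theorem pvTrimA_eq (seq : List Int) (h : seq ≠ [])
    (hT : pvTrimB seq (seq.getLastD 0) seq.length 0 < seq.length) :
    ∀ d i, pvTrimB seq (seq.getLastD 0) seq.length 0 - i = d →
      i ≤ pvTrimB seq (seq.getLastD 0) seq.length 0 →
      pvTrimA seq (seq.length + 1 - i) (-(i : Int)) =
        some (-(pvTrimB seq (seq.getLastD 0) seq.length 0 : Int)) := by
  set n := seq.length with hn
  set T := pvTrimB seq (seq.getLastD 0) n 0 with hTdef
  have hlast : PySem.List.pyGet? seq (-1) = some (seq.getLastD 0) := by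
    rw [PySem.List.pyGet?_neg_one, List.getLastD_eq_getLast?]
    cases hq : seq.getLast? with
    | none => exact absurd (List.getLast?_eq_none_iff.1 hq) h
    | some y => rfl
  intro d
  induction d with
  | zero =>
    intro i hd hle
    have hiT : i = T := by omega
    have hfuel : n + 1 - i = (n - i) + 1 := by omega
    rw [hfuel]
    have hidx := pvIdx seq i (by omega)
    rw [← hn] at hidx
    simp only [pvTrimA, hlast, hidx]
    have hne := pvTrimB_stop seq (seq.getLastD 0) n 0 hT
    rw [← hTdef] at hne
    rw [hiT]
    rw [if_neg (fun he => hne he.symm)]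
  | succ d ih =>
    intro i hd hle
    have hfuel : n + 1 - i = (n - i) + 1 := by omega
    rw [hfuel]
    have hidx := pvIdx seq i (by omega)
    rw [← hn] at hidx
    simp only [pvTrimA, hlast, hidx]
    have heq := pvTrimB_run seq (seq.getLastD 0) n 0 i (by omega) (by omega)
    rw [if_pos heq.symm]
    have harg : -(i : Int) - 1 = -((i + 1 : Nat) : Int) := by push_cast; ring
    have hfuel2 : n - i = n + 1 - (i + 1) := by omega
    rw [harg, hfuel2]
    exact ih (i + 1) (by omega) (by omega)
def pvStep (seq : List Int) (n : Nat) (st : List Int × Bool) (k : Nat) : List Int × Bool :=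
  if st.2 then (seq.getD k 0 :: st.1, st.2)
  else if seq.getD k 0 ≠ seq.getD (n - 1 - k) 0 then (seq.getD k 0 :: st.1, true)
  else st

theorem pvFoldTrue (seq : List Int) (n : Nat) :
    ∀ (l : List Nat) (abs : List Int),
      l.foldl (pvStep seq n) (abs, true) =
        ((l.map (fun k => seq.getD k 0)).reverse ++ abs, true) := by
  intro l
  induction l with
  | nil => intro abs; simp
  | cons k l ih =>
    intro abs
    simp only [List.foldl_cons, pvStep, if_pos]
    rw [ih]
    simp

theorem pvMapSeg (seq : List Int) :
    ∀ (c i : Nat), i + c ≤ seq.length →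
      (List.range' i c).map (fun k => seq.getD k 0) = (seq.drop i).take c := by
  intro c
  induction c with
  | zero => intro i _; simp
  | succ c ih =>
    intro i hc
    have h1 : i < seq.length := by omega
    have h2 : i + 1 + c ≤ seq.length := by omega
    rw [List.range'_succ, List.map_cons, ih (i + 1) h2,
      List.drop_eq_getElem_cons h1, List.take_succ_cons]
    congr 1
    rw [List.getD_eq_getElem?_getD, List.getElem?_eq_getElem h1]
    rfl

theorem pvFoldFind (seq : List Int) (n m : Nat) (hm : m ≤ n) (hn : n = seq.length) :
    ∀ d i, m - i = d → i ≤ m →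
      ((List.range' i (m - i)).foldl (pvStep seq n) ([], false)).1 = pvFindB seq n m i := by
  intro d
  induction d with
  | zero =>
    intro i hd hle
    have : m - i = 0 := hd
    rw [this, pvFindB, dif_neg (by omega)]
    rfl
  | succ d ih =>
    intro i hd hle
    have hi : i < m := by omega
    have hsucc : m - i = (m - i - 1) + 1 := by omega
    rw [hsucc, List.range'_succ, List.foldl_cons]
    by_cases hmis : seq.getD i 0 ≠ seq.getD (n - 1 - i) 0
    · have hstep : pvStep seq n ([], false) i = ([seq.getD i 0], true) := by
        simp only [pvStep, Bool.false_eq_true, if_false, if_pos hmis]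
      rw [hstep, pvFoldTrue, pvFindB, dif_pos hi, if_pos hmis,
        PySem.List.slice_natCast]
      have hmap : (List.range' (i + 1) (m - i - 1)).map (fun k => seq.getD k 0) =
          (seq.drop (i + 1)).take (m - i - 1) := pvMapSeg seq (m - i - 1) (i + 1) (by omega)
      have hfull : (seq.drop i).take (m - i) =
          seq.getD i 0 :: (seq.drop (i + 1)).take (m - i - 1) := by
        conv_lhs => rw [List.drop_eq_getElem_cons (by omega : i < seq.length), hsucc]
        rw [List.take_succ_cons]
        congr 1
        rw [List.getD_eq_getElem?_getD, List.getElem?_eq_getElem (by omega : i < seq.length)]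
        rfl
      rw [hmap, hfull]
      simp
    · have hstep : pvStep seq n ([], false) i = ([], false) := by
        simp only [pvStep, Bool.false_eq_true, if_false, if_neg hmis]
      rw [hstep]
      have hmi : m - i - 1 = m - (i + 1) := by omega
      rw [hmi, ih (i + 1) (by omega) (by omega)]
      conv_rhs => rw [pvFindB]
      rw [dif_pos hi, if_neg hmis]
theorem main_eq (seq : List Int) (h1 : seq ≠ [])
    (h2 : ∃ x ∈ seq, x ≠ seq.getLastD 0) :
    symmetry_check seq = symmetry_check_alt seq := by
  have hn1 : 1 ≤ seq.length := List.length_pos_iff.2 h1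
  have hT := pvTrimB_lt seq h1 h2
  have hTle := pvTrimB_le seq (seq.getLastD 0) seq.length 0 (by omega)
  set n := seq.length with hn
  set T := pvTrimB seq (seq.getLastD 0) n 0 with hTdef
  have hlast? : PySem.List.pyGet? seq (-1) = some (seq.getLastD 0) := by
    rw [PySem.List.pyGet?_neg_one, List.getLastD_eq_getLast?]
    cases hq : seq.getLast? with
    | none => exact absurd (List.getLast?_eq_none_iff.1 hq) h1
    | some y => rfl
  have hA : pvTrimA seq (n + 1) (0 : Int) = some (-(T : Int)) := by
    have := pvTrimA_eq seq h1 hT T 0 (by omega) (by omega)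
    simpa only [Nat.sub_zero, Nat.cast_zero, neg_zero] using this
  unfold symmetry_check symmetry_check_alt
  rw [hA, hlast?]
  simp only []
  have hrange : (-1 + |(-(T : Int))|) = (T : Int) - 1 := by
    rw [abs_neg, Int.abs_natCast]; ring
  rw [hrange, PySem.List.pyRange_neg_one]
  have htn : (((n : Int) - 1) - ((T : Int) - 1)).toNat = n - T := by omega
  rw [htn, List.foldl_map]
  have hcong : ∀ (acc : List Int × Bool), ∀ k ∈ List.range (n - T),
      (fun (st : List Int × Bool) right_num =>
        let left_num := (n : Int) - 1 - right_num
        if st.2 then (PySem.List.pyGetD seq left_num 0 :: st.1, st.2)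
        else if PySem.List.pyGetD seq left_num 0 ≠ PySem.List.pyGetD seq right_num 0 then
          (PySem.List.pyGetD seq left_num 0 :: st.1, true)
        else st) acc ((n : Int) - 1 - (k : Int)) = pvStep seq n acc k := by
    intro acc k hk
    rw [List.mem_range] at hk
    have hr : (n : Int) - 1 - (k : Int) = ((n - 1 - k : Nat) : Int) := by omega
    have hl : (n : Int) - 1 - ((n - 1 - k : Nat) : Int) = ((k : Nat) : Int) := by omega
    simp only [hr, hl, PySem.List.pyGetD_natCast, pvStep]
  rw [PySem.List.foldl_congr_mem _ _ (pvStep seq n) _ hcong]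
  rw [List.range_eq_range']
  have := pvFoldFind seq n (n - T) (by omega) hn (n - T) 0 (by omega) (by omega)
  exact this

-- ===== VERDICT (by name: the statement is the Claim_ definition above) =====
theorem symmetry_check_spec : Claim_equal_symmetry_check := by
  intro seq _ hpre
  unfold Spec_symmetry_check
  exact main_eq seq hpre.1 hpre.2
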